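-- pv_equiv track=rewrite | github.com/kjranyone/TMRVC | tmrvc-data/src/tmrvc_data/bootstrap/stages/enriched_transcript.py | _deduplicate_tags
-- ===== SOURCE A (Python) =====
-- def _deduplicate_tags(text: str) -> str:
--     """Remove consecutive duplicate tags."""
--     tokens = text.split()
--     deduped = []
--     prev_token = ""
--     for token in tokens:
--         if token.startswith("[") and token.endswith("]"):
--             if token == prev_token:
--                 continue
--         deduped.append(token)
--         prev_token = token
--     return " ".join(deduped)
-- ===== SOURCE B (Python) =====
-- def _deduplicate_tags(text: str) -> str:
--     """Remove consecutive duplicate tags (run-grouping two-pointer version)."""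
--     tokens = text.split()
--     out = []
--     n = len(tokens)
--     i = 0
--     while i < n:
--         j = i + 1
--         while j < n and tokens[j] == tokens[i]:
--             j += 1
--         t = tokens[i]
--         if t.startswith("[") and t.endswith("]"):
--             out.append(t)
--         else:
--             out.extend(tokens[i:j])
--         i = j
--     return " ".join(out)
-- ===== Notes on version B (the rewrite author's own statement) =====
-- stated objective: alternative
-- what changed: Replaces the prev_token-tracking single pass with a two-pointer run-grouping scan: each run of consecutive equal tokens is found first, then emitted once if it is a bracket tag or in full otherwise.
import Mathlib
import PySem

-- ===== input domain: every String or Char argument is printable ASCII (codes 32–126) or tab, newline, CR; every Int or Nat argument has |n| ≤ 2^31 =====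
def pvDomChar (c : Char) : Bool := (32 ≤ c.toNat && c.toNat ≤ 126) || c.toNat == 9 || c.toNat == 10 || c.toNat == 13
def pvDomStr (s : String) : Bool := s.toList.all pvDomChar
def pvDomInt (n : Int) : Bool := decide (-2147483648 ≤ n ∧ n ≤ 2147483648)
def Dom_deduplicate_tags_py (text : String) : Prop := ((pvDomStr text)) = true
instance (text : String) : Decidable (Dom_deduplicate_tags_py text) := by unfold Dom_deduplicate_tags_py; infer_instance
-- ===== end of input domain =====

-- B replaces A's prev_token-tracking pass by a two-pointer run-grouping scan (alternative decomposition, same cost).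

-- ===== PORT A =====
-- literal transliteration of A: fold over tokens carrying (deduped, prev_token)
def deduplicate_tags_py (text : String) : String :=
  let tokens := PySem.Str.split₀ text
  let st := tokens.foldl
    (fun (st : List String × String) token =>
      if (PySem.Str.startswith token "[" && PySem.Str.endswith token "]") && token == st.2
      then st
      else (st.1 ++ [token], token))
    ([], "")
  PySem.Str.join " " st.1

-- ===== PORT B =====
-- run-grouping loop of Source B: peel off the run of tokens equal to the head
-- (inner while = takeWhile/dropWhile), emit one copy for a tag, the whole run otherwise
def pvRuns : List String → List String
  | [] => []
  | t :: rest =>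
    (if PySem.Str.startswith t "[" && PySem.Str.endswith t "]"
     then [t]
     else t :: rest.takeWhile (· == t)) ++ pvRuns (rest.dropWhile (· == t))
termination_by l => l.length
decreasing_by
  simpa using Nat.lt_succ_of_le (List.length_dropWhile_le _ _)

def deduplicate_tags_py_alt (text : String) : String :=
  PySem.Str.join " " (pvRuns (PySem.Str.split₀ text))

-- ===== PRECONDITION & SPEC =====
def Spec_deduplicate_tags_py (text : String) (out : String) : Prop := out = deduplicate_tags_py_alt text
instance (text : String) (out : String) : Decidable (Spec_deduplicate_tags_py text out) := by unfold Spec_deduplicate_tags_py; infer_instance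

-- ===== CLAIM (what is proved, stated in full; the proofs are below) =====
def Claim_equal_deduplicate_tags_py : Prop := ∀ (text : String), Dom_deduplicate_tags_py text → Spec_deduplicate_tags_py text (deduplicate_tags_py text)

-- ===== LEMMAS AND PROOFS =====

-- A's loop, as a recursion on the token list carrying only prev_token
def pvA (prev : String) : List String → List String
  | [] => []
  | t :: rest =>
    if (PySem.Str.startswith t "[" && PySem.Str.endswith t "]") && t == prev
    then pvA prev rest
    else t :: pvA t rest

lemma pvA_foldl (l : List String) : ∀ (acc : List String) (prev : String),
    (l.foldl
      (fun (st : List String × String) token =>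
        if (PySem.Str.startswith token "[" && PySem.Str.endswith token "]") && token == st.2
        then st
        else (st.1 ++ [token], token))
      (acc, prev)).1 = acc ++ pvA prev l := by
  induction l with
  | nil => intro acc prev; simp [pvA]
  | cons t rest ih =>
    intro acc prev
    simp only [List.foldl_cons]
    by_cases h : ((PySem.Str.startswith t "[" && PySem.Str.endswith t "]") && t == prev) = true
    · rw [if_pos h, ih, pvA, if_pos h]
    · rw [if_neg h, ih, pvA, if_neg h]
      simp

-- splitting off a run of non-tag tokens does not change pvRuns
lemma pvRuns_run (t : String) (rest : List String)
    (h : (PySem.Str.startswith t "[" && PySem.Str.endswith t "]") = false) :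
    pvRuns rest = rest.takeWhile (· == t) ++ pvRuns (rest.dropWhile (· == t)) := by
  cases rest with
  | nil => simp [pvRuns]
  | cons u rest' =>
    rcases Bool.eq_false_or_eq_true (u == t) with hu | hu
    · have hut : u = t := eq_of_beq hu
      subst hut
      rw [List.takeWhile_cons_of_pos (p := fun x => x == u) hu,
          List.dropWhile_cons_of_pos (p := fun x => x == u) hu,
          pvRuns, if_neg (by rw [h]; exact Bool.false_ne_true)]
    · rw [List.takeWhile_cons_of_neg (p := fun x => x == t) (show ¬(u == t) = true by rw [hu]; exact Bool.false_ne_true),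
          List.dropWhile_cons_of_neg (p := fun x => x == t) (show ¬(u == t) = true by rw [hu]; exact Bool.false_ne_true)]
      rfl

lemma pvA_eq_pvRuns (l : List String) : ∀ (prev : String),
    pvA prev l =
      pvRuns (if (PySem.Str.startswith prev "[" && PySem.Str.endswith prev "]") = true
              then l.dropWhile (· == prev) else l) := by
  induction l with
  | nil => intro prev; split <;> simp [pvA, pvRuns]
  | cons t rest ih =>
    intro prev
    rcases Bool.eq_false_or_eq_true (PySem.Str.startswith t "[" && PySem.Str.endswith t "]")
      with htag | htag
    · -- a tag
      rcases Bool.eq_false_or_eq_true (t == prev) with hp | hp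
      · -- equal to prev: A skips it; B's dropWhile drops it too
        have hcond : ((PySem.Str.startswith t "[" && PySem.Str.endswith t "]") && t == prev) = true := by
          rw [htag, hp]; rfl
        rw [pvA, if_pos hcond, ih prev]
        have hpt : t = prev := eq_of_beq hp
        subst hpt
        rw [if_pos htag, if_pos htag, List.dropWhile_cons_of_pos (p := fun x => x == t) hp]
      · -- a tag different from prev: kept, and its own run collapses to one copy
        have hcond : ((PySem.Str.startswith t "[" && PySem.Str.endswith t "]") && t == prev) = false := by
          rw [hp, Bool.and_false]
        rw [pvA, if_neg (by rw [hcond]; exact Bool.false_ne_true)]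
        have hout : (if (PySem.Str.startswith prev "[" && PySem.Str.endswith prev "]") = true
            then (t :: rest).dropWhile (· == prev) else (t :: rest)) = t :: rest := by
          split
          · rw [List.dropWhile_cons_of_neg (p := fun x => x == prev) (show ¬(t == prev) = true by rw [hp]; exact Bool.false_ne_true)]
          · rfl
        rw [hout, pvRuns, if_pos htag, ih t, if_pos htag]
        rfl
    · -- not a tag: B keeps the whole run of tokens equal to t
      have hcond : ((PySem.Str.startswith t "[" && PySem.Str.endswith t "]") && t == prev) = false := by
        rw [htag, Bool.false_and]
      rw [pvA, if_neg (by rw [hcond]; exact Bool.false_ne_true)]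
      have hout : (if (PySem.Str.startswith prev "[" && PySem.Str.endswith prev "]") = true
          then (t :: rest).dropWhile (· == prev) else (t :: rest)) = t :: rest := by
        split
        · rename_i hpre
          have htp : (t == prev) = false := by
            rcases Bool.eq_false_or_eq_true (t == prev) with h | h
            · rw [show t = prev from eq_of_beq h] at htag
              rw [htag] at hpre
              exact absurd hpre Bool.false_ne_true
            · exact h
          rw [List.dropWhile_cons_of_neg (p := fun x => x == prev) (show ¬(t == prev) = true by rw [htp]; exact Bool.false_ne_true)]
        · rfl
      rw [hout, pvRuns, if_neg (by rw [htag]; exact Bool.false_ne_true), ih t,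
          if_neg (by rw [htag]; exact Bool.false_ne_true), pvRuns_run t rest htag]
      rfl

-- ===== VERDICT (by name: the statement is the Claim_ definition above) =====
theorem deduplicate_tags_py_spec : Claim_equal_deduplicate_tags_py := by
  intro text _
  show PySem.Str.join " "
      ((PySem.Str.split₀ text).foldl
        (fun (st : List String × String) token =>
          if (PySem.Str.startswith token "[" && PySem.Str.endswith token "]") && token == st.2
          then st
          else (st.1 ++ [token], token))
        ([], "")).1
    = PySem.Str.join " " (pvRuns (PySem.Str.split₀ text))
  rw [pvA_foldl, pvA_eq_pvRuns,
      if_neg (by rw [show (PySem.Str.startswith "" "[" && PySem.Str.endswith "" "]") = false from rfl];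
                 exact Bool.false_ne_true)]
  rfl
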